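-- pv_equiv track=rewrite | github.com/ufkapano/graphtheory | graphtheory/permutations/circletools.py | make_cycle_circle
-- ===== SOURCE A (Python) =====
-- def swap(L, i, j):
--     L[i], L[j] = L[j], L[i]
--
-- def make_cycle_circle(n):
--     """Return a cycle graph C_n as double perm."""
--     if n < 3:
--         raise ValueError("n has to be greater than 2")
--     perm = []
--     for i in range(n):
--         perm.extend((i, i))
--     for i in range(1, 2*n-1, 2):
--         swap(perm, i, i+1)
--     swap(perm, 0, -1)
--     return perm
-- ===== SOURCE B (Python) =====
-- def make_cycle_circle(n):
--     """Return a cycle graph C_n as double perm."""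
--     if n < 3:
--         raise ValueError("n has to be greater than 2")
--     return [n - 1 if j == 0 else
--             0 if j == 2 * n - 1 else
--             (j + 1) // 2 if j % 2 else
--             j // 2 - 1
--             for j in range(2 * n)]
-- ===== Notes on version B (the rewrite author's own statement) =====
-- stated objective: simpler
-- what changed: B computes each entry of the double permutation directly from its index with a closed-form formula in one list comprehension, dropping A's build-then-swap passes (the doubled intermediate list, the odd-index swap loop and the swap helper).
import Mathlib
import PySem

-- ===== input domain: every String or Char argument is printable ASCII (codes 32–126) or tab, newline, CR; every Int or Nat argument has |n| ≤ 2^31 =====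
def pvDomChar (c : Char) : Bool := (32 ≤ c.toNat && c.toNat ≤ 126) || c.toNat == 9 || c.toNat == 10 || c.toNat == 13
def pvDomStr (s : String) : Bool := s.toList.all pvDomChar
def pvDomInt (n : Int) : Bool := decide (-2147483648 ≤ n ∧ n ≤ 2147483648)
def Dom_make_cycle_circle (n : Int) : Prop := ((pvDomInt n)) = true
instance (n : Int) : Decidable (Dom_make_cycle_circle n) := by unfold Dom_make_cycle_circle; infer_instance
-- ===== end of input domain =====

-- B replaces A's build-then-swap construction by a closed-form per-index formula (objective: simpler).


-- ===== PORT A =====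
-- 'def swap(L, i, j): L[i], L[j] = L[j], L[i]' — read L[j], L[i], then write them back.
-- pyGetD/pySetD are the total forms of Python indexing; under Pre_ (n ≥ 3) every index A uses is in range,
-- so they agree with Python exactly (the default 0 is never used).
def pvSwap (L : List Int) (i j : Int) : List Int :=
  let vj := PySem.List.pyGetD L j 0
  let vi := PySem.List.pyGetD L i 0
  PySem.List.pySetD (PySem.List.pySetD L i vj) j vi

def make_cycle_circle (n : Int) : List Int :=
  if n < 3 then []  -- Python raises ValueError here; excluded by Pre_
  else
    -- perm = []; for i in range(n): perm.extend((i, i))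
    -- for i in range(1, 2*n-1, 2): swap(perm, i, i+1)
    -- swap(perm, 0, -1)
    pvSwap
      ((PySem.List.pyRange 1 (2*n - 1) 2).foldl (fun acc i => pvSwap acc i (i + 1))
        ((PySem.List.pyRange 0 n 1).foldl (fun acc i => acc ++ [i, i]) []))
      0 (-1)

-- ===== PORT B =====
def make_cycle_circle_alt (n : Int) : List Int :=
  if n < 3 then []  -- Python raises ValueError here; excluded by Pre_
  else
    (PySem.List.pyRange 0 (2*n) 1).map (fun j =>
      if j = 0 then n - 1
      else if j = 2*n - 1 then 0
      else if PySem.Int.mod j 2 ≠ 0 then PySem.Int.floordiv (j + 1) 2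
      else PySem.Int.floordiv j 2 - 1)

-- ===== PRECONDITION & SPEC =====
-- Pre_ excludes exactly n < 3, where the Python raises ValueError.
def Pre_make_cycle_circle (n : Int) : Prop := 3 ≤ n
instance (n : Int) : Decidable (Pre_make_cycle_circle n) := by unfold Pre_make_cycle_circle; infer_instance
def pvWitness_make_cycle_circle : Int := 3

def Spec_make_cycle_circle (n : Int) (out : List Int) : Prop := out = make_cycle_circle_alt n
instance (n : Int) (out : List Int) : Decidable (Spec_make_cycle_circle n out) := by unfold Spec_make_cycle_circle; infer_instance

-- ===== CLAIM (what is proved, stated in full; the proofs are below) =====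
def Claim_equal_make_cycle_circle : Prop := ∀ (n : Int), Dom_make_cycle_circle n → Pre_make_cycle_circle n → Spec_make_cycle_circle n (make_cycle_circle n)

-- ===== LEMMAS AND PROOFS =====

-- the middle part of the result: [1,0, 2,1, ..., t,t-1]
def midM : Nat → List Int
  | 0 => []
  | t+1 => midM t ++ [(t : Int) + 1, (t : Int)]

-- the doubled suffix [a,a, a+1,a+1, ...] with c blocks
def restM : Nat → Nat → List Int
  | _, 0 => []
  | a, c+1 => (a : Int) :: (a : Int) :: restM (a+1) c

lemma length_midM (t : Nat) : (midM t).length = 2*t := by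
  induction t with
  | zero => rfl
  | succ t ih => simp [midM, ih]; omega

lemma flatMap_range'_eq_restM (c a : Nat) :
    (List.range' a c).flatMap (fun k : Nat => [(k : Int), (k : Int)]) = restM a c := by
  induction c generalizing a with
  | zero => rfl
  | succ c ih => simp [List.range', restM, ih]

-- Stage 1 of A: the extend loop builds the doubled list.
lemma stage1 (m : Nat) :
    (PySem.List.pyRange 0 (m : Int) 1).foldl (fun acc i => acc ++ [i, i]) [] = restM 0 m := by
  rw [PySem.List.pyRange_one]
  simp only [List.foldl_map, PySem.List.foldl_append_eq_flatMap, List.nil_append, zero_add]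
  rw [← flatMap_range'_eq_restM m 0, List.range_eq_range']
  simp

-- Stage 2 range: range(1, 2n-1, 2) enumerates the odd indices 1+2k, k < m-1.
lemma swapRange (m : Nat) (hm : 3 ≤ m) :
    PySem.List.pyRange 1 (2*(m : Int) - 1) 2 =
      (List.range (m-1)).map (fun k : Nat => (1 : Int) + 2*(k : Int)) := by
  rw [PySem.List.pyRange_of_pos _ _ (by omega)]
  have h1 : (1 : Int) < 2*(m : Int) - 1 := by omega
  rw [if_pos h1]
  have hcnt : ((2*(m : Int) - 1 - 1 + 2 - 1) / 2).toNat = m - 1 := by omega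
  rw [hcnt]

-- One swap of adjacent positions 2t+1, 2t+2 on a list with a prefix of length 2t+1.
lemma swapStep (P R : List Int) (t : Nat) (a b : Int) (hPlen : P.length = 2*t + 1) :
    pvSwap (P ++ a :: b :: R) ((2*t + 1 : Nat) : Int) (((2*t + 1 : Nat) : Int) + 1)
      = P ++ b :: a :: R := by
  have hidx2 : ((2*t + 1 : Nat) : Int) + 1 = ((2*t + 2 : Nat) : Int) := by push_cast; ring
  rw [pvSwap, hidx2]
  simp only [PySem.List.pyGetD_natCast, PySem.List.pySetD_natCast]
  rw [List.getD_append_right _ _ _ _ (by omega), List.getD_append_right _ _ _ _ (by omega)]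
  have e1 : 2*t + 1 - P.length = 0 := by omega
  have e2 : 2*t + 2 - P.length = 1 := by omega
  rw [e1, e2]
  simp only [List.getD_cons_zero, List.getD_cons_succ]
  rw [List.set_append, if_neg (by omega), e1]
  simp only [List.set_cons_zero]
  rw [List.set_append, if_neg (by simp; omega), e2]
  simp only [List.set_cons_succ, List.set_cons_zero]

-- The swap-loop invariant: after the swaps at indices 1,3,...,2t-1 the list is
-- 0 :: midM t ++ t :: (doubled suffix from t+1).
lemma swapInv (m t : Nat) (hm : 3 ≤ m) (ht : t + 1 ≤ m) :
    ((List.range t).map (fun k : Nat => (1 : Int) + 2*(k : Int))).foldl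
        (fun acc i => pvSwap acc i (i + 1)) (restM 0 m)
      = ((0 : Int) :: midM t) ++ (t : Int) :: restM (t+1) (m - (t+1)) := by
  induction t with
  | zero =>
    have hm1 : m = (m - 1) + 1 := by omega
    simp only [List.range_zero, List.map_nil, List.foldl_nil, midM]
    rw [hm1]
    simp [restM]
  | succ t ih =>
    have ht' : t + 1 ≤ m := by omega
    rw [List.range_succ, List.map_append, List.foldl_append, ih ht']
    simp only [List.map_cons, List.map_nil, List.foldl_cons, List.foldl_nil]
    have hsuf : m - (t+1) = (m - (t+2)) + 1 := by omega
    have hrw : restM (t+1) (m - (t+1))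
        = ((t+1 : Nat) : Int) :: ((t+1 : Nat) : Int) :: restM (t+2) (m - (t+2)) := by
      rw [hsuf]; rfl
    have hidx1 : (1 : Int) + 2*(t : Int) = ((2*t + 1 : Nat) : Int) := by push_cast; ring
    rw [hrw, hidx1]
    have hkey := swapStep ((0 : Int) :: midM t) (((t+1 : Nat) : Int) :: restM (t+2) (m - (t+2)))
      t ((t : Nat) : Int) ((t+1 : Nat) : Int) (by simp [length_midM])
    rw [show ((0 : Int) :: midM t) ++ ((t : Nat) : Int) :: ((t+1 : Nat) : Int) :: ((t+1 : Nat) : Int) :: restM (t+2) (m - (t+2))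
          = ((0 : Int) :: midM t) ++ ((t : Nat) : Int) :: ((t+1 : Nat) : Int) :: (((t+1 : Nat) : Int) :: restM (t+2) (m - (t+2))) from rfl] at *
    rw [hkey]
    have h22 : t + 1 + 1 = t + 2 := rfl
    rw [h22]
    simp [midM]

-- Port A in closed form.
lemma portA_closed (m : Nat) (hm : 3 ≤ m) :
    make_cycle_circle (m : Int) = ((m : Int) - 1) :: midM (m-1) ++ [0] := by
  rw [make_cycle_circle, if_neg (by omega)]
  rw [stage1, swapRange m hm, swapInv m (m-1) hm (by omega)]
  have hz : m - (m - 1 + 1) = 0 := by omega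
  rw [hz]
  set P : List Int := midM (m-1) with hP
  have hPlen : P.length = 2*(m-1) := by simp [hP, length_midM]
  simp only [restM]
  have hY : ((0 : Int) :: P) ++ ((m - 1 : Nat) : Int) :: [] = (0 : Int) :: (P ++ [((m - 1 : Nat) : Int)]) := by simp
  rw [hY]
  have hlen : ((0 : Int) :: (P ++ [((m - 1 : Nat) : Int)])).length = 2*m := by
    simp [hPlen]; omega
  rw [pvSwap]
  have hneg : ∀ (v : Int) (L : List Int), L.length = 2*m →
      PySem.List.pyGetD L (-1) v = L.getD (2*m - 1) v := by
    intro v L hL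
    have h1 : (1 : Int) ≤ 2*(m : Int) := by omega
    simp [PySem.List.pyGetD, PySem.List.pyGet?, PySem.List.pyIdx?, hL, h1, List.getD]
  have hnegset : ∀ (v : Int) (L : List Int), L.length = 2*m →
      PySem.List.pySetD L (-1) v = L.set (2*m - 1) v := by
    intro v L hL
    have h1 : (1 : Int) ≤ 2*(m : Int) := by omega
    simp [PySem.List.pySetD, PySem.List.pySet?, PySem.List.pyIdx?, hL, h1]
  rw [hneg _ _ hlen]
  have hget : ((0 : Int) :: (P ++ [((m - 1 : Nat) : Int)])).getD (2*m - 1) 0 = ((m - 1 : Nat) : Int) := by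
    have h1 : 2*m - 1 = (2*(m-1)) + 1 := by omega
    rw [h1]
    simp only [List.getD_cons_succ]
    rw [List.getD_append_right _ _ _ _ (by omega)]
    simp [hPlen]
  rw [hget]
  have hget0 : PySem.List.pyGetD ((0 : Int) :: (P ++ [((m - 1 : Nat) : Int)])) 0 0 = 0 := by
    simp [PySem.List.pyGetD, PySem.List.pyGet?, PySem.List.pyIdx?,
      show (0 : Int) ≤ (P.length : Int) + 1 by positivity]
  have hset0 : PySem.List.pySetD ((0 : Int) :: (P ++ [((m - 1 : Nat) : Int)])) 0 ((m - 1 : Nat) : Int)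
      = ((m - 1 : Nat) : Int) :: (P ++ [((m - 1 : Nat) : Int)]) := by
    simp [PySem.List.pySetD, PySem.List.pySet?, PySem.List.pyIdx?,
      show (0 : Int) ≤ (P.length : Int) + 1 by positivity]
  rw [hget0, hset0]
  have hlen2 : (((m - 1 : Nat) : Int) :: (P ++ [((m - 1 : Nat) : Int)])).length = 2*m := by
    simp [hPlen]; omega
  rw [hnegset _ _ hlen2]
  have h1 : 2*m - 1 = (2*(m-1)) + 1 := by omega
  rw [h1]
  simp only [List.set_cons_succ]
  rw [List.set_append, if_neg (by omega)]
  have e : 2*(m-1) - P.length = 0 := by omega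
  rw [e]
  simp only [List.set_cons_zero]
  have hc : ((m - 1 : Nat) : Int) = (m : Int) - 1 := by omega
  simp [hc, hP]

-- B's middle entries match midM.
lemma altMid (m t : Nat) (ht : t + 1 ≤ m) :
    (List.range (2*t)).map (fun j : Nat =>
      if ((j : Int) + 1) = 0 then (m : Int) - 1
      else if ((j : Int) + 1) = 2*(m : Int) - 1 then 0
      else if PySem.Int.mod ((j : Int) + 1) 2 ≠ 0 then PySem.Int.floordiv ((j : Int) + 1 + 1) 2
      else PySem.Int.floordiv ((j : Int) + 1) 2 - 1)
    = midM t := by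
  induction t with
  | zero => rfl
  | succ t ih =>
    have ht' : t + 1 ≤ m := by omega
    have h2 : 2*(t+1) = (2*t + 1) + 1 := by omega
    rw [h2, List.range_succ, List.range_succ, List.map_append, List.map_append, ih ht']
    simp only [List.map_cons, List.map_nil, midM]
    have ha : ((2*t : Nat) : Int) + 1 = ((2*t + 1 : Nat) : Int) := by push_cast; ring
    have hb : ((2*t + 1 : Nat) : Int) + 1 = ((2*t + 2 : Nat) : Int) := by push_cast; ring
    have hm1 : PySem.Int.mod ((2*t + 1 : Nat) : Int) 2 = ((1 : Nat) : Int) := by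
      rw [show ((2 : Int)) = ((2 : Nat) : Int) by norm_num, PySem.Int.mod_natCast]
      norm_num [Nat.add_mul_mod_self_left]
    have hm2 : PySem.Int.mod ((2*t + 2 : Nat) : Int) 2 = ((0 : Nat) : Int) := by
      rw [show ((2 : Int)) = ((2 : Nat) : Int) by norm_num, PySem.Int.mod_natCast]
      norm_num
    have hf1 : PySem.Int.floordiv ((2*t + 2 : Nat) : Int) 2 = ((t + 1 : Nat) : Int) := by
      rw [show ((2 : Int)) = ((2 : Nat) : Int) by norm_num, PySem.Int.floordiv_natCast]
      norm_num
    rw [ha, hb]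
    simp only [hm1, hm2, hf1]
    rw [if_neg (by push_cast; omega), if_neg (by push_cast; omega), if_pos (by norm_num)]
    rw [if_neg (by push_cast; omega), if_neg (by push_cast; omega), if_neg (by norm_num)]
    have hv : ((t + 1 : Nat) : Int) - 1 = (t : Int) := by push_cast; ring
    rw [hv]
    simp

-- Port B in closed form.
lemma portB_closed (m : Nat) (hm : 3 ≤ m) :
    make_cycle_circle_alt (m : Int) = ((m : Int) - 1) :: midM (m-1) ++ [0] := by
  rw [make_cycle_circle_alt, if_neg (by omega)]
  rw [PySem.List.pyRange_one]
  have hc : (2*(m : Int) - 0).toNat = 2*m := by omega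
  rw [hc, List.map_map]
  have h1 : 2*m = (2*m - 1) + 1 := by omega
  have h2 : 2*m - 1 = (2*(m-1)) + 1 := by omega
  rw [h1, List.range_succ, h2, List.range_succ_eq_map]
  simp only [List.map_append, List.map_cons, List.map_map, List.map_nil, Function.comp]
  rw [if_pos (by norm_num)]
  have hlast : (0 : Int) + ((2*(m-1) + 1 : Nat) : Int) = 2*(m : Int) - 1 := by push_cast; omega
  rw [hlast, if_neg (by omega), if_pos rfl]
  have hmid : List.map
      (((fun j => if j = 0 then (m : Int) - 1
          else if j = 2*(m : Int) - 1 then 0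
          else if PySem.Int.mod j 2 ≠ 0 then PySem.Int.floordiv (j + 1) 2
          else PySem.Int.floordiv j 2 - 1) ∘ fun k : Nat => 0 + (k : Int)) ∘ Nat.succ)
      (List.range (2*(m-1))) = midM (m-1) := by
    rw [← altMid m (m-1) (by omega)]
    apply List.map_congr_left
    intro j _
    simp only [Function.comp_apply]
    have hz : (0 : Int) + ((j.succ : Nat) : Int) = (j : Int) + 1 := by push_cast; ring
    rw [hz]
  rw [hmid]

-- ===== VERDICT (by name: the statement is the Claim_ definition above) =====
theorem make_cycle_circle_spec : Claim_equal_make_cycle_circle := by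
  intro n _ hpre
  unfold Spec_make_cycle_circle
  have hm3 : 3 ≤ n.toNat := by
    unfold Pre_make_cycle_circle at hpre; omega
  have hn : n = (n.toNat : Int) := by
    unfold Pre_make_cycle_circle at hpre; omega
  rw [hn, portA_closed n.toNat hm3, portB_closed n.toNat hm3]
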